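-- pv_equiv track=rewrite | github.com/ziyerr/legion-0 | hermes-plugin/aipm_cto_collaboration.py | _missing_acceptance_evidence
-- ===== SOURCE A (Python) =====
-- from typing import Any, Dict, List, Optional
--
-- ACCEPTANCE_REQUIRED_EVIDENCE = [
--     "legion delivery/report",
--     "test/build output",
--     "review/acceptance result",
-- ]
--
-- def _missing_acceptance_evidence(evidence: List[Dict[str, str]]) -> List[str]:
--     if not evidence:
--         return ACCEPTANCE_REQUIRED_EVIDENCE
--     labels = [
--         " ".join([item.get("source", ""), item.get("ref", ""), item.get("detail", "")]).lower()
--         for item in evidence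
--     ]
--     checks = {
--         "legion delivery/report": ["legion", "l1", "l2", "delivery", "report", "军团"],
--         "test/build output": ["test", "build", "pytest", "unittest", "测试", "构建"],
--         "review/acceptance result": ["review", "acceptance", "验收", "评审"],
--     }
--     missing: List[str] = []
--     for requirement, words in checks.items():
--         if not any(any(word in label for word in words) for label in labels):
--             missing.append(requirement)
--     return missing
-- ===== SOURCE B (Python) =====
-- from typing import Any, Dict, List, Optional
--
-- ACCEPTANCE_REQUIRED_EVIDENCE = [
--     "legion delivery/report",
--     "test/build output",
--     "review/acceptance result",
-- ]
--
-- CHECKS = {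
--     "legion delivery/report": ["legion", "l1", "l2", "delivery", "report", "军团"],
--     "test/build output": ["test", "build", "pytest", "unittest", "测试", "构建"],
--     "review/acceptance result": ["review", "acceptance", "验收", "评审"],
-- }
--
-- def _missing_acceptance_evidence(evidence: List[Dict[str, str]]) -> List[str]:
--     found = set()
--     for item in evidence:
--         label = " ".join([item.get("source", ""), item.get("ref", ""), item.get("detail", "")]).lower()
--         for requirement, words in CHECKS.items():
--             if requirement not in found and any(word in label for word in words):
--                 found.add(requirement)
--     return [req for req in ACCEPTANCE_REQUIRED_EVIDENCE if req not in found]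
-- ===== Notes on version B (the rewrite author's own statement) =====
-- stated objective: alternative
-- what changed: Inverted the loop nesting: one pass over evidence items accumulating the set of satisfied requirements, then a final filter of the canonical requirement list, instead of a per-requirement full scan of all labels (and no special-cased early return for empty evidence).
import Mathlib
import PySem

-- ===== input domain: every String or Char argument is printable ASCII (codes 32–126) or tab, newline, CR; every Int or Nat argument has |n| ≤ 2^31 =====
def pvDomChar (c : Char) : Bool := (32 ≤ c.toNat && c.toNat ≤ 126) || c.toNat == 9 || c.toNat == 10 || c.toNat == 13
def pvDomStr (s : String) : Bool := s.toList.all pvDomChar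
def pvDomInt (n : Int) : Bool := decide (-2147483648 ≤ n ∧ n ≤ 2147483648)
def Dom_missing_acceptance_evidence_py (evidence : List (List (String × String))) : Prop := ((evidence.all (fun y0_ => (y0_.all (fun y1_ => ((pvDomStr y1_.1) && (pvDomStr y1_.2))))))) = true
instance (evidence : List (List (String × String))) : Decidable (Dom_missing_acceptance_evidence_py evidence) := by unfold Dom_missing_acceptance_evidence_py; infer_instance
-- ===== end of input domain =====

-- B changes the decomposition (single pass over items accumulating satisfied requirements, then a filter), same cost; return values proved equal.

-- ===== PORT A =====
-- shared module constants (same literals in Source A and Source B)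
def pvRequired : List String :=
  ["legion delivery/report", "test/build output", "review/acceptance result"]

def pvChecks : List (String × List String) :=
  [("legion delivery/report", ["legion", "l1", "l2", "delivery", "report", "军团"]),
   ("test/build output", ["test", "build", "pytest", "unittest", "测试", "构建"]),
   ("review/acceptance result", ["review", "acceptance", "验收", "评审"])]

-- ' " ".join([item.get("source",""), item.get("ref",""), item.get("detail","")]).lower() ' (identical line in both Pythons)
def pvLabel (item : List (String × String)) : String :=
  PySem.Str.lower (PySem.Str.join " "
    [PySem.Dict.getD (PySem.Dict.mk item) "source" "",
     PySem.Dict.getD (PySem.Dict.mk item) "ref" "",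
     PySem.Dict.getD (PySem.Dict.mk item) "detail" ""])

def missing_acceptance_evidence_py (evidence : List (List (String × String))) : List String :=
  if evidence = [] then pvRequired
  else
    let labels := evidence.map pvLabel
    pvChecks.foldl
      (fun missing rw =>
        if !(labels.any (fun label => rw.2.any (fun word => PySem.Str.isIn word label))) then
          missing ++ [rw.1]
        else missing) []

-- ===== PORT B =====
def missing_acceptance_evidence_py_alt (evidence : List (List (String × String))) : List String :=
  let found : PySem.Set String :=
    evidence.foldl
      (fun found item =>
        let label := pvLabel item
        pvChecks.foldl
          (fun found rw =>
            if !(PySem.Set.contains found rw.1) && rw.2.any (fun word => PySem.Str.isIn word label) then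
              PySem.Set.add found rw.1
            else found) found)
      PySem.Set.empty
  pvRequired.filter (fun req => !(PySem.Set.contains found req))

-- ===== PRECONDITION & SPEC =====
def Spec_missing_acceptance_evidence_py (evidence : List (List (String × String))) (out : List String) : Prop := out = missing_acceptance_evidence_py_alt evidence
instance (evidence : List (List (String × String))) (out : List String) : Decidable (Spec_missing_acceptance_evidence_py evidence out) := by unfold Spec_missing_acceptance_evidence_py; infer_instance

-- ===== CLAIM (what is proved, stated in full; the proofs are below) =====
def Claim_equal_missing_acceptance_evidence_py : Prop := ∀ (evidence : List (List (String × String))), Dom_missing_acceptance_evidence_py evidence → Spec_missing_acceptance_evidence_py evidence (missing_acceptance_evidence_py evidence)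

-- ===== LEMMAS AND PROOFS =====

-- hit_i label: 'some keyword of requirement i occurs in label'
def pvHit1 (label : String) : Bool :=
  (["legion", "l1", "l2", "delivery", "report", "军团"] : List String).any (fun w => PySem.Str.isIn w label)
def pvHit2 (label : String) : Bool :=
  (["test", "build", "pytest", "unittest", "测试", "构建"] : List String).any (fun w => PySem.Str.isIn w label)
def pvHit3 (label : String) : Bool :=
  (["review", "acceptance", "验收", "评审"] : List String).any (fun w => PySem.Str.isIn w label)

-- one item step of B's outer loop (definitionally the lambda in the port)
def pvStep (found : PySem.Set String) (item : List (String × String)) : PySem.Set String :=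
  pvChecks.foldl
    (fun found rw =>
      if !(PySem.Set.contains found rw.1) && rw.2.any (fun word => PySem.Str.isIn word (pvLabel item)) then
        PySem.Set.add found rw.1
      else found) found

theorem pvStepOne (f : PySem.Set String) (k : String) (c : Bool) (r : String) :
    PySem.Set.contains (if !(PySem.Set.contains f k) && c then PySem.Set.add f k else f) r
      = (PySem.Set.contains f r || (r == k && c)) := by
  by_cases hr : r = k <;> cases c <;>
    by_cases hk : PySem.Set.contains f k = true <;>
    simp_all [PySem.Set.add, PySem.Set.contains]

theorem pvStep_contains (found : PySem.Set String) (item : List (String × String)) (r : String) :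
    PySem.Set.contains (pvStep found item) r =
      (PySem.Set.contains found r
        || (r == "legion delivery/report" && pvHit1 (pvLabel item))
        || (r == "test/build output" && pvHit2 (pvLabel item))
        || (r == "review/acceptance result" && pvHit3 (pvLabel item))) := by
  simp only [pvStep, pvChecks, List.foldl, pvHit1, pvHit2, pvHit3]
  rw [pvStepOne, pvStepOne, pvStepOne]

theorem pvFold_contains (evidence : List (List (String × String))) (found : PySem.Set String) (r : String) :
    PySem.Set.contains (evidence.foldl pvStep found) r =
      (PySem.Set.contains found r
        || evidence.any (fun item =>
            (r == "legion delivery/report" && pvHit1 (pvLabel item))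
            || (r == "test/build output" && pvHit2 (pvLabel item))
            || (r == "review/acceptance result" && pvHit3 (pvLabel item)))) := by
  induction evidence generalizing found with
  | nil => simp
  | cons e es ih =>
      simp only [List.foldl_cons, List.any_cons, ih, pvStep_contains]
      cases PySem.Set.contains found r <;> simp [Bool.or_assoc]

theorem pvFound1 (evidence : List (List (String × String))) :
    PySem.Set.contains (evidence.foldl pvStep PySem.Set.empty) "legion delivery/report"
      = evidence.any (fun item => pvHit1 (pvLabel item)) := by
  rw [pvFold_contains]
  simp [PySem.Set.contains, PySem.Set.empty]

theorem pvFound2 (evidence : List (List (String × String))) :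
    PySem.Set.contains (evidence.foldl pvStep PySem.Set.empty) "test/build output"
      = evidence.any (fun item => pvHit2 (pvLabel item)) := by
  rw [pvFold_contains]
  simp [PySem.Set.contains, PySem.Set.empty]

theorem pvFound3 (evidence : List (List (String × String))) :
    PySem.Set.contains (evidence.foldl pvStep PySem.Set.empty) "review/acceptance result"
      = evidence.any (fun item => pvHit3 (pvLabel item)) := by
  rw [pvFold_contains]
  simp [PySem.Set.contains, PySem.Set.empty]

theorem missing_acceptance_evidence_py_spec' (evidence : List (List (String × String))) :
    missing_acceptance_evidence_py evidence = missing_acceptance_evidence_py_alt evidence := by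
  by_cases hne : evidence = []
  · subst hne; decide
  · unfold missing_acceptance_evidence_py missing_acceptance_evidence_py_alt
    rw [if_neg hne]
    show (pvChecks.foldl _ []) =
      (pvRequired.filter fun req => !(PySem.Set.contains (evidence.foldl pvStep PySem.Set.empty) req))
    have h1 : PySem.Set.contains (evidence.foldl pvStep PySem.Set.empty) "legion delivery/report"
        = (evidence.any fun item => (["legion", "l1", "l2", "delivery", "report", "军团"] : List String).any fun word => PySem.Str.isIn word (pvLabel item)) := pvFound1 evidence
    have h2 : PySem.Set.contains (evidence.foldl pvStep PySem.Set.empty) "test/build output"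
        = (evidence.any fun item => (["test", "build", "pytest", "unittest", "测试", "构建"] : List String).any fun word => PySem.Str.isIn word (pvLabel item)) := pvFound2 evidence
    have h3 : PySem.Set.contains (evidence.foldl pvStep PySem.Set.empty) "review/acceptance result"
        = (evidence.any fun item => (["review", "acceptance", "验收", "评审"] : List String).any fun word => PySem.Str.isIn word (pvLabel item)) := pvFound3 evidence
    cases hb1 : (evidence.any fun item => (["legion", "l1", "l2", "delivery", "report", "军团"] : List String).any fun word => PySem.Str.isIn word (pvLabel item)) <;>
    cases hb2 : (evidence.any fun item => (["test", "build", "pytest", "unittest", "测试", "构建"] : List String).any fun word => PySem.Str.isIn word (pvLabel item)) <;>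
    cases hb3 : (evidence.any fun item => (["review", "acceptance", "验收", "评审"] : List String).any fun word => PySem.Str.isIn word (pvLabel item)) <;>
      simp only [pvChecks, pvRequired, List.foldl_cons, List.foldl_nil, List.filter_cons,
        List.filter_nil, List.any_map, Function.comp_def, h1, h2, h3, hb1, hb2, hb3,
        Bool.not_true, Bool.not_false, if_true, if_false, Bool.false_eq_true, decide_true,
        decide_false, List.nil_append, List.append_nil, List.cons_append, ite_true, ite_false] <;>
      rfl

-- ===== VERDICT (by name: the statement is the Claim_ definition above) =====
theorem missing_acceptance_evidence_py_spec : Claim_equal_missing_acceptance_evidence_py := by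
  intro evidence _
  exact missing_acceptance_evidence_py_spec' evidence
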